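-- pv_equiv track=rewrite | github.com/abilian/geoname-sandbox | scripts/parse-zip-codes.py | split_cc
-- ===== SOURCE A (Python) =====
-- from dataclasses import asdict, dataclass
--
-- @dataclass
-- class Town:
--     country_code: str
--     name: str
--     zip_code: str
--
-- def split_cc(towns: list) -> dict:
--     results = {}
--     for t in towns:
--         data = Town(t[0], t[2], t[1])
--         if data.country_code not in results:
--             results[data.country_code] = []
--         results[data.country_code].append(asdict(data))
--     return results
-- ===== SOURCE B (Python) =====
-- def split_cc(towns: list) -> dict:
--     codes = list(dict.fromkeys(t[0] for t in towns))
--     return {cc: [{"country_code": t[0], "name": t[2], "zip_code": t[1]}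
--                  for t in towns if t[0] == cc]
--             for cc in codes}
-- ===== Notes on version B (the rewrite author's own statement) =====
-- stated objective: alternative
-- what changed: Replaces A's incremental dict-of-lists fold (membership test, list init, append per row) with a two-phase decomposition: first compute the distinct country codes in first-occurrence order via dict.fromkeys, then build the whole result in one dict comprehension with a filtering list comprehension per code.
import Mathlib
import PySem

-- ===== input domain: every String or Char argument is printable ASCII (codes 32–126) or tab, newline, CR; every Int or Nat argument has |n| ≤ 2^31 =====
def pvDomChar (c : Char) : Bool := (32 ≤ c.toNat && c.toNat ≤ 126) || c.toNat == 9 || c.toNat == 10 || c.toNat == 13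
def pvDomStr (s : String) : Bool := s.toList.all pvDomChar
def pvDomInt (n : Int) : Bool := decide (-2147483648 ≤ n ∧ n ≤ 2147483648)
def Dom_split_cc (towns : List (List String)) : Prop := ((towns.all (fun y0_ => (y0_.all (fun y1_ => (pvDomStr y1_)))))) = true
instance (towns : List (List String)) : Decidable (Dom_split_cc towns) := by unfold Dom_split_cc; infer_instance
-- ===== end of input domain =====

-- B differs from A in decomposition only (distinct codes first, then one filtered pass per code);
-- both read t[0], t[2], t[1], so the shared helpers below are each row's key and its asdict(Town(...)) row.
-- t[0]  (total form of the index; exact under Pre_split_cc, which guarantees the index is in range)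
def pvKey (t : List String) : String := (PySem.List.pyGet? t 0).getD ""
-- asdict(Town(t[0], t[2], t[1])) : field order country_code, name, zip_code
def pvRow (t : List String) : List (String × String) :=
  [("country_code", pvKey t), ("name", (PySem.List.pyGet? t 2).getD ""),
   ("zip_code", (PySem.List.pyGet? t 1).getD "")]

-- ===== PORT A =====
def split_cc (towns : List (List String)) : List (String × List (List (String × String))) :=
  (towns.foldl
    (fun results t =>
      let cc := pvKey t
      let results :=
        if results.contains cc then results
        else results.insert cc ([] : List (List (String × String)))
      results.modify cc [] (fun l => l ++ [pvRow t]))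
    PySem.Dict.empty).items

-- ===== PORT B =====
def split_cc_alt (towns : List (List String)) : List (String × List (List (String × String))) :=
  (PySem.List.dedup (towns.map pvKey)).map
    (fun cc => (cc, (towns.filter (fun t => pvKey t == cc)).map pvRow))

-- ===== PRECONDITION & SPEC =====
-- Pre_ excludes exactly the rows on which the Python A raises IndexError (a row shorter than 3 entries).
def Pre_split_cc (towns : List (List String)) : Prop := ∀ t ∈ towns, 3 ≤ t.length
instance (towns : List (List String)) : Decidable (Pre_split_cc towns) := by unfold Pre_split_cc; infer_instance
def pvWitness_split_cc : List (List String) := [["us", "10001", "New York"], ["fr", "75001", "Paris"]]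

def Spec_split_cc (towns : List (List String)) (out : List (String × List (List (String × String)))) : Prop := out = split_cc_alt towns
instance (towns : List (List String)) (out : List (String × List (List (String × String)))) : Decidable (Spec_split_cc towns out) := by unfold Spec_split_cc; infer_instance

-- ===== CLAIM (what is proved, stated in full; the proofs are below) =====
def Claim_equal_split_cc : Prop := ∀ (towns : List (List String)), Dom_split_cc towns → Pre_split_cc towns → Spec_split_cc towns (split_cc towns)

-- ===== LEMMAS AND PROOFS =====

-- A's "init-if-absent then append" step is one modify-with-default step.
theorem pv_step_eq (d : PySem.Dict String (List (List (String × String)))) (t : List String) :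
    (if d.contains (pvKey t) then d else d.insert (pvKey t) []).modify (pvKey t) []
        (fun l => l ++ [pvRow t])
      = d.modify (pvKey t) [] (fun l => l ++ [pvRow t]) := by
  by_cases h : d.contains (pvKey t)
  · rw [if_pos h]
  · rw [if_neg h]
    replace h : d.contains (pvKey t) = false := Bool.eq_false_iff.mpr h
    have hany : (d.items.any fun p => p.1 == pvKey t) = false := by
      simpa [PySem.Dict.contains] using h
    have h' : ∀ p ∈ d.items, p.1 ≠ pvKey t := by
      intro p hp; simpa using List.any_eq_false.mp hany p hp
    have hfind : List.find? (fun p => p.1 == pvKey t) d.items = none :=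
      List.find?_eq_none.mpr (fun p hp => by simp [h' p hp])
    apply PySem.Dict.ext
    simp only [PySem.Dict.modify, PySem.Dict.insert, PySem.Dict.contains, PySem.Dict.getD,
      PySem.Dict.get?, hany, Bool.false_eq_true, if_false]
    simp [hfind, List.map_append]
    exact List.map_congr_left (fun p hp => by simp [h' p hp]) |>.trans (List.map_id d.items)

-- A's fold is the plain modify fold over (key, row) pairs.
theorem split_cc_eq_modify_fold (towns : List (List String)) :
    split_cc towns
      = ((towns.map (fun t => (pvKey t, pvRow t))).foldl
          (fun d p => d.modify p.1 [] (fun l => l ++ [p.2])) PySem.Dict.empty).items := by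
  unfold split_cc
  rw [List.foldl_map]
  exact congrArg PySem.Dict.items
    (congrFun (congrFun (congrArg List.foldl (funext fun d => funext fun t => pv_step_eq d t))
      PySem.Dict.empty) towns)

-- the modify fold's items are exactly B's dedup-then-filter table
theorem modify_fold_items_eq_alt (towns : List (List String)) :
    ((towns.map (fun t => (pvKey t, pvRow t))).foldl
        (fun d p => d.modify p.1 [] (fun l => l ++ [p.2])) PySem.Dict.empty).items
      = split_cc_alt towns := by
  set D := ((towns.map (fun t => (pvKey t, pvRow t))).foldl
        (fun d p => d.modify p.1 [] (fun l => l ++ [p.2])) PySem.Dict.empty) with hD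
  have hnodup : D.keys.Nodup := by
    rw [hD]
    exact PySem.Dict.nodup_keys_foldl_modify_key _ Prod.fst _ _ _ PySem.Dict.nodup_keys_empty
  have hkeys : D.keys = PySem.List.dedup (towns.map pvKey) := by
    rw [hD, PySem.Dict.keys_foldl_modify_key]
    simp [PySem.Dict.keys_empty, List.map_map, PySem.List.dedup_eq_ofList]
    rfl
  have hgetD : ∀ c, D.getD c [] = (towns.filter (fun t => pvKey t == c)).map pvRow := by
    intro c
    rw [hD, PySem.Dict.getD_foldl_modify_append, PySem.Dict.getD_empty, List.filter_map,
      List.map_map]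
    simp [Function.comp_def]
  rw [PySem.Dict.items_eq_map_keys D hnodup [], hkeys]
  exact List.map_congr_left (fun c _ => by rw [hgetD c])

-- ===== VERDICT (by name: the statement is the Claim_ definition above) =====
theorem split_cc_spec : Claim_equal_split_cc := by
  intro towns _ _
  unfold Spec_split_cc
  rw [split_cc_eq_modify_fold, modify_fold_items_eq_alt]
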